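-- pv_equiv track=rewrite | github.com/HsxMark/TrashCanCodes | Bridge/SUESCup/_C.py | can_connect_all_sockets
-- ===== SOURCE A (Python) =====
-- def can_connect_all_sockets(socket_distances, cable_lengths):
--     """
--     判断是否所有插座都可以用网线连接到交换机。
--
--     参数:
--     socket_distances (list): 插座到交换机的距离列表。
--     cable_lengths (list): 网线长度列表。
--
--     返回:
--     str: 如果所有插座都能用网线连接，返回"DA"，否则返回"NE"。
--     """
--
--     # 对插座距离和网线长度进行升序排序，方便进行匹配
--     socket_distances.sort()  # 将插座距离从小到大排列
--     cable_lengths.sort()     # 将网线长度从小到大排列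
--
--     # 初始化一个指向网线列表的索引，用来追踪当前处理的网线
--     cable_index = 0
--
--     # 遍历每个插座的距离
--     for distance in socket_distances:
--         # 寻找能够连接当前插座的网线
--         # 如果当前网线长度小于插座距离，继续寻找更长的网线
--         while cable_index < len(cable_lengths) and cable_lengths[cable_index] < distance:
--             cable_index += 1  # 移动到下一根网线
--
--         # 如果已经用尽了所有网线，但还没找到合适的网线，则返回"NE"
--         if cable_index == len(cable_lengths):
--             return "NE"
--
--         # 找到合适的网线之后，继续处理下一根网线
--         # 这里我们假设每根网线只能用一次，所以找到合适网线后需要移动索引到下一根网线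
--         cable_index += 1
--
--     # 如果所有插座都成功连接上网线，返回"DA"
--     return "DA"
-- ===== SOURCE B (Python) =====
-- def can_connect_all_sockets(socket_distances, cable_lengths):
--     # Same in-place sorts as A (mutation side effect preserved).
--     socket_distances.sort()
--     cable_lengths.sort()
--     m = len(socket_distances)
--     if len(cable_lengths) < m:
--         return "NE"
--     top = cable_lengths[len(cable_lengths) - m:]
--     return "DA" if all(c >= d for c, d in zip(top, socket_distances)) else "NE"
-- ===== Notes on version B (the rewrite author's own statement) =====
-- stated objective: simpler
-- what changed: Replaces the two-pointer skipping scan over cables with a length check plus an element-wise comparison of the largest m cables against the sorted socket distances.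
import Mathlib
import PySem

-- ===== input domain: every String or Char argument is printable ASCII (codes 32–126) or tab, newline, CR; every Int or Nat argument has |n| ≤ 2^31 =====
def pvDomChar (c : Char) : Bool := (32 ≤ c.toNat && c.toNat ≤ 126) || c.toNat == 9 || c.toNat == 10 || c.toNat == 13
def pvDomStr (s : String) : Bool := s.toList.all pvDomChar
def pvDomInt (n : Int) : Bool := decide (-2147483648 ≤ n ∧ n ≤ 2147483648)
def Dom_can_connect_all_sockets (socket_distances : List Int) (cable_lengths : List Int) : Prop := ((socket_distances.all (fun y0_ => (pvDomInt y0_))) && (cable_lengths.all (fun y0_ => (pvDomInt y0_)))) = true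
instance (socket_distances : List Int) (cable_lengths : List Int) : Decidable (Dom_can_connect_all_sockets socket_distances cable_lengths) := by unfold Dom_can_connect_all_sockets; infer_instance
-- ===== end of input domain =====

-- B replaces A's two-pointer skipping scan by comparing the largest m cables
-- element-wise with the sorted socket distances (objective: simpler).
-- Both Pythons sort their arguments IN PLACE (the same mutation); the theorems
-- below are about the return value.

-- ===== PORT A =====
-- the inner 'while' loop: advance cable_index past cables shorter than distance
def pvWhileA (cs : List Int) (d : Int) (i : Nat) : Nat :=
  if h : i < cs.length then
    if cs[i] < d then pvWhileA cs d (i + 1) else i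
  else i
termination_by cs.length - i

-- the 'for distance in socket_distances' loop carrying cable_index
def pvLoopA (s : List Int) (cs : List Int) (i : Nat) : String :=
  match s with
  | [] => "DA"
  | d :: ds =>
    let j := pvWhileA cs d i
    if j = cs.length then "NE" else pvLoopA ds cs (j + 1)

def can_connect_all_sockets (socket_distances : List Int) (cable_lengths : List Int) : String :=
  let s := PySem.List.sorted socket_distances (fun x => x) false
  let cs := PySem.List.sorted cable_lengths (fun x => x) false
  pvLoopA s cs 0

-- ===== PORT B =====
-- length check + slice of the largest m cables compared element-wise
def pvCheckB (s : List Int) (cs : List Int) : String :=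
  if cs.length < s.length then "NE"
  else if ((cs.drop (cs.length - s.length)).zip s).all (fun p => p.2 ≤ p.1) then "DA"
  else "NE"

def can_connect_all_sockets_alt (socket_distances : List Int) (cable_lengths : List Int) : String :=
  let s := PySem.List.sorted socket_distances (fun x => x) false
  let cs := PySem.List.sorted cable_lengths (fun x => x) false
  pvCheckB s cs

-- ===== PRECONDITION & SPEC =====
def Spec_can_connect_all_sockets (socket_distances : List Int) (cable_lengths : List Int) (out : String) : Prop := out = can_connect_all_sockets_alt socket_distances cable_lengths
instance (socket_distances : List Int) (cable_lengths : List Int) (out : String) : Decidable (Spec_can_connect_all_sockets socket_distances cable_lengths out) := by unfold Spec_can_connect_all_sockets; infer_instance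

-- ===== CLAIM (what is proved, stated in full; the proofs are below) =====
def Claim_equal_can_connect_all_sockets : Prop := ∀ (socket_distances : List Int) (cable_lengths : List Int), Dom_can_connect_all_sockets socket_distances cable_lengths → Spec_can_connect_all_sockets socket_distances cable_lengths (can_connect_all_sockets socket_distances cable_lengths)

-- ===== LEMMAS AND PROOFS =====

-- a cable shorter than the smallest remaining socket distance is irrelevant to B's check
lemma pvCheckB_skip (d : Int) (ds : List Int) (h : Int) (t : List Int) (hh : h < d) :
    pvCheckB (d :: ds) (h :: t) = pvCheckB (d :: ds) t := by
  unfold pvCheckB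
  simp only [List.length_cons]
  rcases lt_trichotomy t.length ds.length with hl | hl | hl
  · rw [if_pos (show t.length + 1 < ds.length + 1 by omega),
        if_pos (show t.length < ds.length + 1 by omega)]
  · rw [if_neg (show ¬ t.length + 1 < ds.length + 1 by omega),
        if_pos (show t.length < ds.length + 1 by omega)]
    simp only [show t.length + 1 - (ds.length + 1) = 0 from by omega,
      List.drop_zero, List.zip_cons_cons, List.all_cons]
    have hfd : decide (d ≤ h) = false := by simp; omega
    simp [hfd]
  · rw [if_neg (show ¬ t.length + 1 < ds.length + 1 by omega),
        if_neg (show ¬ t.length < ds.length + 1 by omega)]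
    simp only [show t.length + 1 - (ds.length + 1) = (t.length - (ds.length + 1)) + 1 from by omega,
      List.drop_succ_cons]
    rfl

-- matching the first remaining socket with a sufficient smallest remaining cable
lemma pvCheckB_match (d : Int) (ds : List Int) (c0 : Int) (rest : List Int)
    (hdc : d ≤ c0) (hmin : ∀ x ∈ rest, c0 ≤ x) :
    pvCheckB (d :: ds) (c0 :: rest) = pvCheckB ds rest := by
  unfold pvCheckB
  simp only [List.length_cons]
  rcases lt_trichotomy rest.length ds.length with hl | hl | hl
  · rw [if_pos (show rest.length + 1 < ds.length + 1 by omega), if_pos hl]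
  · rw [if_neg (show ¬ rest.length + 1 < ds.length + 1 by omega),
        if_neg (show ¬ rest.length < ds.length by omega)]
    simp only [show rest.length + 1 - (ds.length + 1) = 0 from by omega,
      show rest.length - ds.length = 0 from by omega,
      List.drop_zero, List.zip_cons_cons, List.all_cons]
    simp only [decide_eq_true hdc, Bool.true_and]
  · rw [if_neg (show ¬ rest.length + 1 < ds.length + 1 by omega),
        if_neg (show ¬ rest.length < ds.length by omega)]
    simp only [show rest.length + 1 - (ds.length + 1) = (rest.length - ds.length - 1) + 1 from by omega,
      List.drop_succ_cons]
    have hlt : rest.length - ds.length - 1 < rest.length := by omega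
    simp only [List.drop_eq_getElem_cons hlt,
      show rest.length - ds.length - 1 + 1 = rest.length - ds.length from by omega,
      List.zip_cons_cons, List.all_cons]
    simp only [decide_eq_true (le_trans hdc (hmin _ (rest.getElem_mem hlt))), Bool.true_and]

lemma pvWhileA_ge (cs : List Int) (d : Int) (i : Nat) : i ≤ pvWhileA cs d i := by
  unfold pvWhileA
  split
  · split
    · exact le_trans (Nat.le_succ i) (pvWhileA_ge cs d (i + 1))
    · exact le_refl i
  · exact le_refl i
termination_by cs.length - i

lemma pvWhileA_le (cs : List Int) (d : Int) (i : Nat) (hi : i ≤ cs.length) :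
    pvWhileA cs d i ≤ cs.length := by
  unfold pvWhileA
  split
  · split
    · exact pvWhileA_le cs d (i + 1) (by omega)
    · exact hi
  · exact hi
termination_by cs.length - i

lemma pvWhileA_found (cs : List Int) (d : Int) (i : Nat)
    (hj : pvWhileA cs d i < cs.length) : d ≤ cs.getD (pvWhileA cs d i) 0 := by
  by_cases h : i < cs.length
  · by_cases hlt : cs[i] < d
    · have hrw : pvWhileA cs d i = pvWhileA cs d (i + 1) := by
        rw [pvWhileA, dif_pos h, if_pos hlt]
      rw [hrw] at hj ⊢
      exact pvWhileA_found cs d (i + 1) hj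
    · have hrw : pvWhileA cs d i = i := by
        rw [pvWhileA, dif_pos h, if_neg hlt]
      rw [hrw]
      rw [List.getD_eq_getElem cs 0 h]
      omega
  · have hrw : pvWhileA cs d i = i := by rw [pvWhileA, dif_neg h]
    rw [hrw] at hj
    omega
termination_by cs.length - i

-- skipping cables shorter than d does not change B's verdict
lemma pvCheckB_strip (d : Int) (ds : List Int) (cs : List Int) (i : Nat) (_hi : i ≤ cs.length) :
    pvCheckB (d :: ds) (cs.drop i) = pvCheckB (d :: ds) (cs.drop (pvWhileA cs d i)) := by
  by_cases h : i < cs.length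
  · by_cases hlt : cs[i] < d
    · have hrw : pvWhileA cs d i = pvWhileA cs d (i + 1) := by
        rw [pvWhileA, dif_pos h, if_pos hlt]
      rw [hrw, List.drop_eq_getElem_cons h, pvCheckB_skip d ds _ _ hlt]
      exact pvCheckB_strip d ds cs (i + 1) (by omega)
    · have hrw : pvWhileA cs d i = i := by
        rw [pvWhileA, dif_pos h, if_neg hlt]
      rw [hrw]
  · have hrw : pvWhileA cs d i = i := by rw [pvWhileA, dif_neg h]
    rw [hrw]
termination_by cs.length - i

-- core invariant: A's loop from cable_index i equals B's check on the remaining cables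
lemma loopA_eq_checkB (s : List Int) (cs : List Int) (i : Nat)
    (hc : cs.Pairwise (· ≤ ·)) (hi : i ≤ cs.length) :
    pvLoopA s cs i = pvCheckB s (cs.drop i) := by
  induction s generalizing i with
  | nil => simp [pvLoopA, pvCheckB]
  | cons d ds ih =>
    simp only [pvLoopA]
    rw [pvCheckB_strip d ds cs i hi]
    have hjle : pvWhileA cs d i ≤ cs.length := pvWhileA_le cs d i hi
    by_cases hj : pvWhileA cs d i = cs.length
    · rw [if_pos hj, hj, List.drop_length]
      simp [pvCheckB]
    · rw [if_neg hj]
      have hjlt : pvWhileA cs d i < cs.length := lt_of_le_of_ne hjle hj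
      have hfound : d ≤ cs[pvWhileA cs d i] := by
        have := pvWhileA_found cs d i hjlt
        rwa [List.getD_eq_getElem cs 0 hjlt] at this
      have hmin : ∀ x ∈ cs.drop (pvWhileA cs d i + 1), cs[pvWhileA cs d i] ≤ x := by
        have hp : (cs.drop (pvWhileA cs d i)).Pairwise (· ≤ ·) :=
          hc.sublist (List.drop_sublist _ cs)
        rw [List.drop_eq_getElem_cons hjlt] at hp
        exact (List.pairwise_cons.mp hp).1
      rw [List.drop_eq_getElem_cons hjlt, pvCheckB_match d ds _ _ hfound hmin]
      exact ih (pvWhileA cs d i + 1) (by omega)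

-- ===== VERDICT (by name: the statement is the Claim_ definition above) =====
theorem can_connect_all_sockets_spec : Claim_equal_can_connect_all_sockets := by
  intro sd cl _
  unfold Spec_can_connect_all_sockets can_connect_all_sockets can_connect_all_sockets_alt
  simp only
  rw [loopA_eq_checkB _ _ 0
    (by simpa using PySem.List.sorted_pairwise (xs := cl) (key := fun x => x))
    (Nat.zero_le _)]
  simp
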